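-- pv_equiv track=rewrite | github.com/grasshopperTrainer/coding_practice | baekjoon/accepted/카드 게임.py | solution
-- ===== SOURCE A (Python) =====
-- import bisect
--
-- def ds_find(node, tree):
--     if tree[node] == node:
--         return node
--     tree[node] = ds_find(tree[node], tree)
--     return tree[node]
--
-- def solution(N, M, K, cards, draws):
--     tree = [i for i in range(M)]
--
--     answers = []
--     cards.sort()
--     for draw in draws:
--         card_i = bisect.bisect_right(cards, draw)
--         card_i = ds_find(card_i, tree)
--         answers.append(cards[card_i])
--         tree[card_i] += 1
--     return answers
-- ===== SOURCE B (Python) =====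
-- import bisect
--
-- def solution(N, M, K, cards, draws):
--     cards.sort()
--     used = [False] * M
--     answers = []
--     for draw in draws:
--         i = bisect.bisect_right(cards, draw)
--         while used[i]:
--             i += 1
--         answers.append(cards[i])
--         used[i] = True
--     return answers
-- ===== Notes on version B (the rewrite author's own statement) =====
-- stated objective: simpler
-- what changed: The path-compressed union-find 'next free slot' structure is replaced by a plain boolean used-array with a linear while-scan from the bisect position; both sort cards in place (same observable mutation).
import Mathlib
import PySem

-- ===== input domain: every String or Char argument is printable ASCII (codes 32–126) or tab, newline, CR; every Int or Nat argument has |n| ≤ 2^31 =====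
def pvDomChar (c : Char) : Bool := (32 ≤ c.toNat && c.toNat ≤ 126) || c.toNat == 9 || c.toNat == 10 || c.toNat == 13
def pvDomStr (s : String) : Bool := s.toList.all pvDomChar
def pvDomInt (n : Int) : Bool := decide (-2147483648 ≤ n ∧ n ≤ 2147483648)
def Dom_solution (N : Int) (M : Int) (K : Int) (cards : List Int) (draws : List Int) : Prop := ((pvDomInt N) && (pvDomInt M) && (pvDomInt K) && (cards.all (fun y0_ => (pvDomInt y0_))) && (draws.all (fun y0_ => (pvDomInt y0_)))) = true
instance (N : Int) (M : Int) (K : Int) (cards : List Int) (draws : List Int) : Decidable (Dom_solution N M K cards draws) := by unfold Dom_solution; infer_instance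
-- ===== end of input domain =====

-- B replaces A's path-compressed union-find "next free slot" structure by a boolean
-- used-array with a linear scan (objective: simpler).  Note: both A and B sort the
-- `cards` argument in place (the same observable mutation); the equivalence proved
-- here is about the return value.

-- ===== PORT A =====
-- ds_find(node, tree): path-compressed find.  The Python recursion has no structural
-- measure, so the port carries a fuel counter; the caller passes tree.length + 1,
-- which never runs out on the chains A actually builds (tree[i] > i there).
-- pyGet? = none is Python's IndexError (outside Pre_); the port then returns junk.
def dsFind : Nat → Int → List Int → Int × List Int
  | 0, node, tree => (node, tree)
  | fuel+1, node, tree =>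
    match PySem.List.pyGet? tree node with
    | none => (node, tree)
    | some t =>
      if t = node then (node, tree)
      else
        let p := dsFind fuel t tree
        (p.1, PySem.List.pySetD p.2 node p.1)

def solution (N : Int) (M : Int) (K : Int) (cards : List Int) (draws : List Int) : List Int :=
  let tree := PySem.List.pyRange 0 M 1
  let sc := PySem.List.sorted cards (fun x => x)
  (draws.foldl (fun (st : List Int × List Int) draw =>
      let ci0 : Int := (PySem.List.bisectRight sc draw : Nat)
      let p := dsFind (st.2.length + 1) ci0 st.2
      let tree' := match PySem.List.pyGet? p.2 p.1 with
        | some v => PySem.List.pySetD p.2 p.1 (v + 1)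
        | none => p.2
      (st.1 ++ [PySem.List.pyGetD sc p.1 0], tree'))
    ([], tree)).1

-- ===== PORT B =====
-- while used[i]: i += 1  — first index ≥ i not marked used (stops at the end of the
-- array, where Python's used[i] raises IndexError: outside Pre_).
def scanFree (used : List Bool) (i : Nat) : Nat :=
  if h : i < used.length then
    if used[i] then scanFree used (i+1) else i
  else i
termination_by used.length - i

def solution_alt (N : Int) (M : Int) (K : Int) (cards : List Int) (draws : List Int) : List Int :=
  let sc := PySem.List.sorted cards (fun x => x)
  (draws.foldl (fun (st : List Int × List Bool) draw =>
      let i := scanFree st.2 (PySem.List.bisectRight sc draw)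
      (st.1 ++ [PySem.List.pyGetD sc (i : Nat) 0], st.2.set i true))
    ([], List.replicate M.toNat false)).1

-- ===== PRECONDITION & SPEC =====
-- Pre_ is the Hall condition that characterises exactly the inputs on which A (and B)
-- return: for every draw value d, the number of draws ≥ d is at most the number of
-- usable slots (positions i < min(M, len(cards)) of the sorted cards) holding a card > d.
-- On its complement A raises IndexError (no free card slot in range at some step).
def Pre_solution (N : Int) (M : Int) (K : Int) (cards : List Int) (draws : List Int) : Prop :=
  ∀ d ∈ draws,
    draws.countP (fun x => decide (d ≤ x)) ≤
      ((Finset.range (min M.toNat cards.length)).filter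
        (fun i => d < (PySem.List.sorted cards (fun x => x)).getD i 0)).card
instance (N : Int) (M : Int) (K : Int) (cards : List Int) (draws : List Int) : Decidable (Pre_solution N M K cards draws) := by unfold Pre_solution; infer_instance

def pvWitness_solution : Int × Int × Int × List Int × List Int := (3, 3, 2, [1, 5, 2], [1, 4])

def Spec_solution (N : Int) (M : Int) (K : Int) (cards : List Int) (draws : List Int) (out : List Int) : Prop := out = solution_alt N M K cards draws
instance (N : Int) (M : Int) (K : Int) (cards : List Int) (draws : List Int) (out : List Int) : Decidable (Spec_solution N M K cards draws out) := by unfold Spec_solution; infer_instance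

-- ===== CLAIM (what is proved, stated in full; the proofs are below) =====
def Claim_equal_solution : Prop := ∀ (N : Int) (M : Int) (K : Int) (cards : List Int) (draws : List Int), Dom_solution N M K cards draws → Pre_solution N M K cards draws → Spec_solution N M K cards draws (solution N M K cards draws)

-- ===== LEMMAS AND PROOFS =====

theorem getD_lt {α : Type} (l : List α) (i : Nat) (d : α) (h : i < l.length) :
    l.getD i d = l[i] := by
  simp [List.getD_eq_getElem?_getD, List.getElem?_eq_getElem h]

theorem getD_set_lt {α : Type} (l : List α) (n : Nat) (v : α) (i : Nat) (d : α)
    (hn : n < l.length) :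
    (l.set n v).getD i d = if i = n then v else l.getD i d := by
  simp only [List.getD_eq_getElem?_getD, List.getElem?_set]
  split_ifs with h1 h2 h3
  · simp
  · omega
  · omega
  · rfl

theorem scanFree_ge (used : List Bool) (i : Nat) : i ≤ scanFree used i := by
  fun_induction scanFree used i with
  | case1 i h hu ih => omega
  | case2 i h hu => omega
  | case3 i h => omega

theorem scanFree_le (used : List Bool) (i : Nat) (h : i ≤ used.length) :
    scanFree used i ≤ used.length := by
  fun_induction scanFree used i with
  | case1 i h hu ih => exact ih (by omega)
  | case2 i h hu => omega
  | case3 i h => omega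

theorem scanFree_skipped (used : List Bool) (i : Nat) :
    ∀ j, i ≤ j → j < scanFree used i → used.getD j false = true := by
  fun_induction scanFree used i with
  | case1 i h hu ih =>
      intro j hij hjs
      rcases Nat.eq_or_lt_of_le hij with rfl | hlt
      · rw [getD_lt _ _ _ h]; exact hu
      · exact ih j hlt hjs
  | case2 i h hu => intro j hij hjs; omega
  | case3 i h => intro j hij hjs; omega

theorem scanFree_free (used : List Bool) (i : Nat) (h : scanFree used i < used.length) :
    used.getD (scanFree used i) false = false := by
  fun_induction scanFree used i with
  | case1 i h1 hu ih => exact ih h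
  | case2 i h1 hu => rw [getD_lt _ _ _ h1]; simpa using hu
  | case3 i h1 => omega

theorem scanFree_le_of_free (used : List Bool) (i j : Nat) (hij : i ≤ j)
    (hj : j < used.length) (hfree : used.getD j false = false) :
    scanFree used i ≤ j := by
  by_contra hc
  have := scanFree_skipped used i j hij (by omega)
  rw [this] at hfree; exact absurd hfree (by simp [this])

theorem scanFree_step (used : List Bool) (i : Nat) (h : i < used.length)
    (hu : used.getD i false = true) : scanFree used i = scanFree used (i+1) := by
  have hb : used[i] = true := by rw [getD_lt _ _ _ h] at hu; exact hu
  rw [scanFree]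
  simp [h, hb]

theorem scanFree_eq_of_used_range (used : List Bool) (i k : Nat) (hik : i ≤ k)
    (hk : k ≤ used.length)
    (hused : ∀ j, i ≤ j → j < k → used.getD j false = true) :
    scanFree used i = scanFree used k := by
  obtain ⟨n, rfl⟩ : ∃ n, k = i + n := ⟨k - i, by omega⟩
  induction n generalizing i with
  | zero => rfl
  | succ n ih =>
      rw [scanFree_step used i (by omega) (hused i le_rfl (by omega))]
      have heq := ih (i+1) (by omega) (by omega) (fun j hj1 hj2 => hused j (by omega) (by omega))
      rw [heq]; congr 1; omega

def UFInv (tree : List Int) (used : List Bool) : Prop :=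
  tree.length = used.length ∧
  ∀ i, i < used.length →
    (used.getD i false = false → tree.getD i 0 = i) ∧
    (used.getD i false = true →
      (i : Int) < tree.getD i 0 ∧ tree.getD i 0 ≤ (used.length : Int) ∧
      ∀ j : Nat, i ≤ j → (j : Int) < tree.getD i 0 → used.getD j false = true)

def countFree (used : List Bool) (sc : List Int) (d : Int) : Nat :=
  ((Finset.range (min used.length sc.length)).filter
    (fun i => used.getD i false = false ∧ d < sc.getD i 0)).card

def HallInv (rest : List Int) (used : List Bool) (sc : List Int) : Prop :=
  ∀ d ∈ rest, rest.countP (fun x => decide (d ≤ x)) ≤ countFree used sc d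

theorem dsFind_eq (fuel : Nat) (node : Int) (tree : List Int) (used : List Bool)
    (hinv : UFInv tree used) (h0 : 0 ≤ node) (hle : node.toNat ≤ used.length)
    (hfuel : used.length - node.toNat < fuel) :
    (dsFind fuel node tree).1 = ((scanFree used node.toNat : Nat) : Int) ∧
    UFInv (dsFind fuel node tree).2 used := by
  induction fuel generalizing node tree with
  | zero => omega
  | succ fuel ih =>
    obtain ⟨hlen, hI⟩ := hinv
    have hpg0 : PySem.List.pyGet? tree node = tree[node.toNat]? := PySem.List.pyGet?_of_nonneg tree h0
    rcases hpg : tree[node.toNat]? with _ | t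
    · -- IndexError: node = used.length
      have hge : tree.length ≤ node.toNat := by
        rw [List.getElem?_eq_none_iff] at hpg; exact hpg
      have hn : node.toNat = used.length := by omega
      have hsf : scanFree used used.length = used.length := by
        rw [scanFree]; simp
      rw [show dsFind (fuel+1) node tree = (node, tree) by rw [dsFind, hpg0, hpg]]
      refine ⟨by simp [hn, hsf]; omega, hlen, hI⟩
    · obtain ⟨hlt, ht'⟩ := List.getElem?_eq_some_iff.mp hpg
      have ht : t = tree.getD node.toNat 0 := by rw [getD_lt _ _ _ hlt, ht']
      have hnode : ((node.toNat : Int)) = node := Int.toNat_of_nonneg h0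
      by_cases hu : used.getD node.toNat false = true
      · -- node is used: follow the chain
        obtain ⟨hlt2, hle2, hrange⟩ := (hI node.toNat (by omega)).2 hu
        rw [← ht] at hlt2 hle2 hrange
        have htne : ¬ t = node := by omega
        have htnn : 0 ≤ t := by omega
        obtain ⟨hp1, hplen, hpI⟩ := ih t tree ⟨hlen, hI⟩ htnn (by omega) (by omega)
        have hscan : scanFree used node.toNat = scanFree used t.toNat := by
          apply scanFree_eq_of_used_range _ _ _ (by omega) (by omega)
          intro j hj1 hj2
          exact hrange j hj1 (by omega)
        have hred : dsFind (fuel+1) node tree =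
            ((dsFind fuel t tree).1, PySem.List.pySetD (dsFind fuel t tree).2 node (dsFind fuel t tree).1) := by
          rw [dsFind, hpg0, hpg]
          simp only [if_neg htne]
        rw [hred]
        have hset : PySem.List.pySetD (dsFind fuel t tree).2 node (dsFind fuel t tree).1
            = (dsFind fuel t tree).2.set node.toNat (dsFind fuel t tree).1 :=
          PySem.List.pySetD_of_nonneg (dsFind fuel t tree).2 (dsFind fuel t tree).1 h0
        have hnlt : node.toNat < (dsFind fuel t tree).2.length := by omega
        have hstep := scanFree_step used node.toNat (by omega) hu
        have hge1 := scanFree_ge used (node.toNat + 1)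
        have hler := scanFree_le used t.toNat (by omega)
        have hskip := scanFree_skipped used node.toNat
        refine ⟨by rw [hscan]; exact hp1, ?_, ?_⟩
        · simp only [hset, List.length_set]; omega
        · intro i hi
          simp only [hset, getD_set_lt _ _ _ _ _ hnlt]
          by_cases hin : i = node.toNat
          · subst hin
            rw [if_pos rfl]
            refine ⟨fun hf => absurd hu (by rw [hf]; simp), fun _ => ?_⟩
            rw [hp1, hscan] at *
            refine ⟨by push_cast; omega, by push_cast; omega, ?_⟩
            intro j hj1 hj2
            refine hskip j hj1 (by rw [hscan]; omega)
          · rw [if_neg hin]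
            exact hpI i hi
      · -- node is free: tree[node] = node, return immediately
        have hf : used.getD node.toNat false = false := by
          cases hq : used.getD node.toNat false
          · rfl
          · exact absurd hq hu
        have hroot : tree.getD node.toNat 0 = node.toNat := (hI node.toNat (by omega)).1 hf
        have hteq : t = node := by rw [ht, hroot]; omega
        have hred : dsFind (fuel+1) node tree = (node, tree) := by
          rw [dsFind, hpg0, hpg]
          simp only [if_pos hteq]
        rw [hred]
        have hsf : scanFree used node.toNat = node.toNat := by
          rw [scanFree]
          have hb : used[node.toNat] = false := by rw [← getD_lt _ _ false (by omega)]; exact hf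
          simp [hb, Nat.lt_of_lt_of_le hlt (le_of_eq hlen)]
        exact ⟨by rw [hsf]; omega, hlen, hI⟩

theorem pairwise_getD_mono (sc : List Int) (hsort : sc.Pairwise (· ≤ ·)) (p q : Nat)
    (hpq : p ≤ q) (hq : q < sc.length) : sc.getD p 0 ≤ sc.getD q 0 := by
  rcases Nat.eq_or_lt_of_le hpq with rfl | hlt
  · exact le_rfl
  · rw [getD_lt _ _ _ (by omega), getD_lt _ _ _ hq]
    exact List.pairwise_iff_getElem.mp hsort p q (by omega) hq hlt

theorem bisect_le_of_lt (sc : List Int) (hsort : sc.Pairwise (· ≤ ·)) (d : Int) (i : Nat)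
    (hi : i < sc.length) (h : d < sc.getD i 0) : PySem.List.bisectRight sc d ≤ i := by
  by_contra hc
  have h2 := (PySem.List.bisectRight_spec sc d hsort).2.1 i hi (by omega)
  rw [getD_lt _ _ _ hi] at h; omega

theorem lt_of_bisect_le (sc : List Int) (hsort : sc.Pairwise (· ≤ ·)) (d : Int) (j : Nat)
    (hj : j < sc.length) (h : PySem.List.bisectRight sc d ≤ j) : d < sc.getD j 0 := by
  rw [getD_lt _ _ _ hj]
  exact (PySem.List.bisectRight_spec sc d hsort).2.2 j hj h

theorem countFree_set_of_not_lt (used : List Bool) (sc : List Int) (r : Nat)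
    (hr : r < used.length) (e : Int) (h : ¬ e < sc.getD r 0) :
    countFree (used.set r true) sc e = countFree used sc e := by
  unfold countFree
  rw [List.length_set]
  congr 1
  apply Finset.filter_congr
  intro i hi
  rw [getD_set_lt _ _ _ _ _ hr]
  by_cases hir : i = r
  · subst hir; simp [← List.getD_eq_getElem?_getD, h]
  · simp [← List.getD_eq_getElem?_getD, hir]

theorem countFree_set_of_lt (used : List Bool) (sc : List Int) (r : Nat)
    (hru : r < used.length) (hrs : r < sc.length)
    (hfree : used.getD r false = false) (e : Int) (h : e < sc.getD r 0) :
    countFree (used.set r true) sc e + 1 = countFree used sc e := by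
  unfold countFree
  rw [List.length_set]
  have hmem : r ∈ (Finset.range (min used.length sc.length)).filter
      (fun i => used.getD i false = false ∧ e < sc.getD i 0) := by
    simp [Finset.mem_filter, Finset.mem_range, ← List.getD_eq_getElem?_getD, hfree, h]; omega
  have hset : (Finset.range (min used.length sc.length)).filter
      (fun i => (used.set r true).getD i false = false ∧ e < sc.getD i 0)
      = ((Finset.range (min used.length sc.length)).filter
          (fun i => used.getD i false = false ∧ e < sc.getD i 0)).erase r := by
    ext i
    simp only [Finset.mem_erase, Finset.mem_filter, Finset.mem_range]
    rw [getD_set_lt _ _ _ _ _ hru]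
    by_cases hir : i = r
    · subst hir; simp [← List.getD_eq_getElem?_getD]
    · simp [← List.getD_eq_getElem?_getD, hir]
  rw [hset, Finset.card_erase_of_mem hmem]
  have := Finset.card_pos.mpr ⟨r, hmem⟩
  omega

theorem hall_feasible (sc : List Int) (hsort : sc.Pairwise (· ≤ ·)) (used : List Bool)
    (d : Int) (rest : List Int) (hhall : HallInv (d :: rest) used sc) :
    scanFree used (PySem.List.bisectRight sc d) < min used.length sc.length ∧
    PySem.List.bisectRight sc d ≤ scanFree used (PySem.List.bisectRight sc d) ∧
    used.getD (scanFree used (PySem.List.bisectRight sc d)) false = false ∧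
    d < sc.getD (scanFree used (PySem.List.bisectRight sc d)) 0 := by
  have h1 := hhall d (List.mem_cons_self)
  have hcnt : 1 ≤ (d :: rest).countP (fun x => decide (d ≤ x)) := by
    rw [List.countP_cons]; simp
  have hcf : 0 < countFree used sc d := by omega
  obtain ⟨i, hi⟩ := Finset.card_pos.mp hcf
  simp only [countFree, Finset.mem_filter, Finset.mem_range] at hi
  obtain ⟨hirange, hifree, hilt⟩ := hi
  have hstart_le : PySem.List.bisectRight sc d ≤ i := bisect_le_of_lt sc hsort d i (by omega) hilt
  have hr_le : scanFree used (PySem.List.bisectRight sc d) ≤ i :=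
    scanFree_le_of_free used _ i hstart_le (by omega) hifree
  have hge := scanFree_ge used (PySem.List.bisectRight sc d)
  exact ⟨by omega, hge, scanFree_free used _ (by omega),
    lt_of_bisect_le sc hsort d _ (by omega) (by omega)⟩

theorem hall_step (sc : List Int) (hsort : sc.Pairwise (· ≤ ·)) (used : List Bool)
    (d : Int) (rest : List Int) (hhall : HallInv (d :: rest) used sc) :
    HallInv rest (used.set (scanFree used (PySem.List.bisectRight sc d)) true) sc := by
  obtain ⟨hrmin, hrge, hrfree, hrlt⟩ := hall_feasible sc hsort used d rest hhall
  set r := scanFree used (PySem.List.bisectRight sc d) with hrdef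
  intro d' hd'
  by_cases hlt : d' < sc.getD r 0
  · have hdec := countFree_set_of_lt used sc r (by omega) (by omega) hrfree d' hlt
    by_cases hdd : d' ≤ d
    · have h2 := hhall d' (List.mem_cons_of_mem _ hd')
      rw [List.countP_cons] at h2
      rw [if_pos (by simpa using hdd)] at h2
      omega
    · replace hdd : d < d' := by omega
      have hCFeq : countFree used sc d' = countFree used sc d := by
        unfold countFree
        congr 1
        apply Finset.filter_congr
        intro i hi
        simp only [Finset.mem_range] at hi
        constructor
        · rintro ⟨hf, hl⟩; exact ⟨hf, lt_trans hdd hl⟩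
        · rintro ⟨hf, hl⟩
          refine ⟨hf, ?_⟩
          have hsi := bisect_le_of_lt sc hsort d i (by omega) hl
          have hri : r ≤ i := scanFree_le_of_free used _ i hsi (by omega) hf
          have := pairwise_getD_mono sc hsort r i hri (by omega)
          omega
      have h3 := hhall d (List.mem_cons_self)
      rw [List.countP_cons, if_pos (by simp)] at h3
      have hmono : rest.countP (fun x => decide (d' ≤ x)) ≤ rest.countP (fun x => decide (d ≤ x)) := by
        apply List.countP_mono_left
        intro a _ ha
        simp only [decide_eq_true_eq] at *
        omega
      omega
  · rw [countFree_set_of_not_lt used sc r (by omega) d' hlt]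
    have h2 := hhall d' (List.mem_cons_of_mem _ hd')
    rw [List.countP_cons] at h2
    omega

theorem ufinv_mark (tree : List Int) (used : List Bool) (hinv : UFInv tree used) (r : Nat)
    (hr : r < used.length) :
    UFInv (tree.set r ((r : Int) + 1)) (used.set r true) := by
  obtain ⟨hlen, hI⟩ := hinv
  have hrt : r < tree.length := by omega
  refine ⟨by simp [hlen], ?_⟩
  intro i hi
  rw [List.length_set] at hi
  simp only [List.length_set, getD_set_lt (hn := hr), getD_set_lt (hn := hrt)]
  by_cases hir : i = r
  · subst hir
    constructor
    · intro h; rw [if_pos rfl] at h; cases h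
    · intro _
      refine ⟨?_, ?_, ?_⟩
      · rw [if_pos rfl]; omega
      · rw [if_pos rfl]; omega
      · intro j hj1 hj2
        rw [if_pos rfl] at hj2
        have hji : j = i := by omega
        rw [if_pos hji]
  · simp only [if_neg hir]
    obtain ⟨hfree, hused⟩ := hI i hi
    refine ⟨hfree, fun hu => ?_⟩
    obtain ⟨h1, h2, h3⟩ := hused hu
    refine ⟨h1, h2, ?_⟩
    intro j hj1 hj2
    by_cases hjr : j = r
    · rw [if_pos hjr]
    · rw [if_neg hjr]; exact h3 j hj1 hj2

theorem fold_eq (sc : List Int) (hsort : sc.Pairwise (· ≤ ·)) :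
    ∀ (dl ans : List Int) (tree : List Int) (used : List Bool),
    UFInv tree used → HallInv dl used sc →
    (dl.foldl (fun (st : List Int × List Int) draw =>
      let ci0 : Int := (PySem.List.bisectRight sc draw : Nat)
      let p := dsFind (st.2.length + 1) ci0 st.2
      let tree' := match PySem.List.pyGet? p.2 p.1 with
        | some v => PySem.List.pySetD p.2 p.1 (v + 1)
        | none => p.2
      (st.1 ++ [PySem.List.pyGetD sc p.1 0], tree')) (ans, tree)).1 =
    (dl.foldl (fun (st : List Int × List Bool) draw =>
      let i := scanFree st.2 (PySem.List.bisectRight sc draw)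
      (st.1 ++ [PySem.List.pyGetD sc (i : Nat) 0], st.2.set i true)) (ans, used)).1 := by
  intro dl
  induction dl with
  | nil => intro ans tree used _ _; rfl
  | cons d rest ih =>
    intro ans tree used hinv hhall
    obtain ⟨hrmin, hrge, hrfree, hrlt⟩ := hall_feasible sc hsort used d rest hhall
    obtain ⟨hlen, hI⟩ := hinv
    have hfind := dsFind_eq (tree.length + 1) ((PySem.List.bisectRight sc d : Nat) : Int)
      tree used ⟨hlen, hI⟩ (by positivity) (by simp; omega) (by simp; omega)
    simp only [List.foldl_cons]
    set r := scanFree used (PySem.List.bisectRight sc d) with hrdef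
    rw [Int.toNat_natCast] at hfind
    obtain ⟨hp1, hpinv⟩ := hfind
    obtain ⟨hplen, hpI⟩ := hpinv
    have hroot : (dsFind (tree.length + 1) ((PySem.List.bisectRight sc d : Nat) : Int) tree).2.getD r 0 = r :=
      (hpI r (by omega)).1 hrfree
    have hget : PySem.List.pyGet? (dsFind (tree.length + 1) ((PySem.List.bisectRight sc d : Nat) : Int) tree).2
        ((r : Nat) : Int) = some ((r : Nat) : Int) := by
      rw [PySem.List.pyGet?_natCast, ← hroot, getD_lt _ _ _ (by omega),
        List.getElem?_eq_getElem (by omega)]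
    rw [hp1, hget]
    have hmark := ufinv_mark _ _ ⟨hplen, hpI⟩ r (by omega)
    rw [← PySem.List.pySetD_natCast] at hmark
    exact ih _ _ _ hmark (hall_step sc hsort used d rest hhall)

theorem ufinv_init (M : Int) :
    UFInv (PySem.List.pyRange 0 M 1) (List.replicate M.toNat false) := by
  constructor
  · simp [PySem.List.length_pyRange_one]
  · intro i hi
    rw [List.length_replicate] at hi
    rw [List.getD_replicate false hi]
    refine ⟨fun _ => ?_, fun h => by cases h⟩
    rw [getD_lt _ _ _ (by simp [PySem.List.length_pyRange_one]; omega),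
      PySem.List.getElem_pyRange_one]
    omega

theorem hall_init (M : Int) (cards draws : List Int)
    (hpre : ∀ d ∈ draws,
      draws.countP (fun x => decide (d ≤ x)) ≤
        ((Finset.range (min M.toNat cards.length)).filter
          (fun i => d < (PySem.List.sorted cards (fun x => x)).getD i 0)).card) :
    HallInv draws (List.replicate M.toNat false) (PySem.List.sorted cards (fun x => x)) := by
  intro d hd
  have h := hpre d hd
  unfold countFree
  rw [List.length_replicate, PySem.List.length_sorted]
  have hcong : (Finset.range (min M.toNat cards.length)).filter
      (fun i => (List.replicate M.toNat false).getD i false = false ∧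
        d < (PySem.List.sorted cards (fun x => x)).getD i 0)
      = (Finset.range (min M.toNat cards.length)).filter
        (fun i => d < (PySem.List.sorted cards (fun x => x)).getD i 0) := by
    apply Finset.filter_congr
    intro i hi
    simp only [Finset.mem_range] at hi
    rw [List.getD_replicate false (by omega)]
    simp
  rw [hcong]
  exact h

-- ===== VERDICT (by name: the statement is the Claim_ definition above) =====
theorem solution_spec : Claim_equal_solution := by
  intro N M K cards draws _ hpre
  show solution N M K cards draws = solution_alt N M K cards draws
  unfold solution solution_alt
  exact fold_eq (PySem.List.sorted cards (fun x => x))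
    (PySem.List.sorted_pairwise cards (fun x => x)) draws [] _ _
    (ufinv_init M) (hall_init M cards draws hpre)
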